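-- pv_equiv track=rewrite | github.com/manwar/perlweeklychallenge-club | challenge-349/pokgopun/python/ch-2.py | mp
-- ===== SOURCE A (Python) =====
-- def mp(string: str) -> bool:
--     x, y = 0, 0
--     for c in string:
--         match c:
--             case "U":
--                 y += 1
--             case "D":
--                 y -= 1
--             case "L":
--                 x -= 1
--             case "R":
--                 x += 1
--         if x == 0 and y == 0:
--             return True
--     return False
-- ===== SOURCE B (Python) =====
-- def mp(string: str) -> bool:
--     # Two-pass, back-to-front formulation: the position after k moves equals the
--     # total displacement minus the displacement of the remaining suffix, so the
--     # walk revisits the origin iff some suffix of string[1:] (including the empty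
--     # suffix) has displacement equal to the total displacement of the whole string.
--     if not string:
--         return False
--     tx = sum(1 if c == "R" else -1 if c == "L" else 0 for c in string)
--     ty = sum(1 if c == "U" else -1 if c == "D" else 0 for c in string)
--     sx, sy = 0, 0
--     if (sx, sy) == (tx, ty):
--         return True
--     for c in reversed(string[1:]):
--         sx += 1 if c == "R" else -1 if c == "L" else 0
--         sy += 1 if c == "U" else -1 if c == "D" else 0
--         if (sx, sy) == (tx, ty):
--             return True
--     return False
-- ===== Notes on version B (the rewrite author's own statement) =====
-- stated objective: alternative
-- what changed: Instead of simulating the walk forward and testing each position against the origin, B first sums the total displacement of the whole string and then scans suffix displacements backwards from the end, reporting a revisit iff some suffix displacement equals the total (position after k steps = total - suffix displacement).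
import Mathlib
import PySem

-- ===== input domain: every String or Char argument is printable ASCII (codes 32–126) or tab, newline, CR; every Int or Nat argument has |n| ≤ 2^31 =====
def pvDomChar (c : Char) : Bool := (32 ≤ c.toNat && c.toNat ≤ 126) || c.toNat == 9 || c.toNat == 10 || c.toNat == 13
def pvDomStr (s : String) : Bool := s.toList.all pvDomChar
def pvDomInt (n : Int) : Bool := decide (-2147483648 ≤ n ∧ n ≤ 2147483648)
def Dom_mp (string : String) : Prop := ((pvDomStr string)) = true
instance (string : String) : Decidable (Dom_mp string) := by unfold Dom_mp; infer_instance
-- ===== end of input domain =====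

-- B replaces A's forward walk (check each position against the origin) by a two-pass,
-- back-to-front algorithm: total displacement first, then a backwards scan of suffix
-- displacements compared against that total (objective: alternative).

-- ===== PORT A =====
-- literal loop of A: state (x, y), match on the char, early return on origin
def mpLoop : List Char → Int → Int → Bool
  | [], _, _ => false
  | c :: cs, x, y =>
    let x' : Int := if c = 'L' then x - 1 else if c = 'R' then x + 1 else x
    let y' : Int := if c = 'U' then y + 1 else if c = 'D' then y - 1 else y
    if x' = 0 ∧ y' = 0 then true else mpLoop cs x' y'

def mp (string : String) : Bool := mpLoop string.toList 0 0

-- ===== PORT B =====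
-- Source B: '1 if c == "R" else -1 if c == "L" else 0' (and the U/D analogue)
def mpAltDx (c : Char) : Int := if c = 'R' then 1 else if c = 'L' then -1 else 0
def mpAltDy (c : Char) : Int := if c = 'U' then 1 else if c = 'D' then -1 else 0

-- Source B: the 'for c in reversed(string[1:])' loop accumulating a suffix displacement
def mpAltLoop : List Char → Int → Int → Int → Int → Bool
  | [], _, _, _, _ => false
  | c :: cs, sx, sy, tx, ty =>
    let sx' := sx + mpAltDx c
    let sy' := sy + mpAltDy c
    if sx' = tx ∧ sy' = ty then true else mpAltLoop cs sx' sy' tx ty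

def mp_alt (string : String) : Bool :=
  if string.toList = [] then false
  else
    let tx := (string.toList.map mpAltDx).sum
    let ty := (string.toList.map mpAltDy).sum
    if (0 : Int) = tx ∧ (0 : Int) = ty then true
    else mpAltLoop ((string.toList.drop 1).reverse) 0 0 tx ty

-- ===== PRECONDITION & SPEC =====
def Spec_mp (string : String) (out : Bool) : Prop := out = mp_alt string
instance (string : String) (out : Bool) : Decidable (Spec_mp string out) := by unfold Spec_mp; infer_instance

-- ===== CLAIM (what is proved, stated in full; the proofs are below) =====
def Claim_equal_mp : Prop := ∀ (string : String), Dom_mp string → Spec_mp string (mp string)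

-- ===== LEMMAS AND PROOFS =====

def sdx (l : List Char) : Int := (l.map mpAltDx).sum
def sdy (l : List Char) : Int := (l.map mpAltDy).sum

theorem sdx_cons (c : Char) (l : List Char) : sdx (c :: l) = mpAltDx c + sdx l := by
  simp [sdx]
theorem sdy_cons (c : Char) (l : List Char) : sdy (c :: l) = mpAltDy c + sdy l := by
  simp [sdy]
theorem sdx_append (t r : List Char) : sdx (t ++ r) = sdx t + sdx r := by
  simp [sdx]
theorem sdy_append (t r : List Char) : sdy (t ++ r) = sdy t + sdy r := by
  simp [sdy]
theorem sdx_reverse (l : List Char) : sdx l.reverse = sdx l := by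
  simp [sdx, List.map_reverse]
theorem sdy_reverse (l : List Char) : sdy l.reverse = sdy l := by
  simp [sdy, List.map_reverse]

-- A's per-character updates are exactly adding mpAltDx / mpAltDy
theorem mpLoop_eq_altLoop : ∀ (cs : List Char) (x y : Int),
    mpLoop cs x y = mpAltLoop cs x y 0 0 := by
  intro cs
  induction cs with
  | nil => intro x y; rfl
  | cons c cs ih =>
    intro x y
    have hx : (if c = 'L' then x - 1 else if c = 'R' then x + 1 else x) = x + mpAltDx c := by
      by_cases h1 : c = 'L' <;> by_cases h2 : c = 'R' <;> simp_all [mpAltDx, sub_eq_add_neg]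
    have hy : (if c = 'U' then y + 1 else if c = 'D' then y - 1 else y) = y + mpAltDy c := by
      by_cases h1 : c = 'U' <;> by_cases h2 : c = 'D' <;> simp_all [mpAltDy, sub_eq_add_neg]
    simp only [mpLoop, mpAltLoop, hx, hy, ih]

-- characterisation of the (suffix-)scan loop: it fires on some nonempty prefix of l
theorem altLoop_iff : ∀ (l : List Char) (sx sy tx ty : Int),
    mpAltLoop l sx sy tx ty = true ↔
      ∃ t r, l = t ++ r ∧ t ≠ [] ∧ sx + sdx t = tx ∧ sy + sdy t = ty := by
  intro l
  induction l with
  | nil =>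
    intro sx sy tx ty
    simp only [mpAltLoop, Bool.false_eq_true, false_iff]
    rintro ⟨t, r, h, ht, -⟩
    rcases List.append_eq_nil_iff.mp h.symm with ⟨h1, -⟩
    exact ht h1
  | cons c cs ih =>
    intro sx sy tx ty
    simp only [mpAltLoop]
    split_ifs with h
    · simp only [true_iff]
      exact ⟨[c], cs, rfl, by simp, by simpa [sdx] using h.1, by simpa [sdy] using h.2⟩
    · rw [ih]
      constructor
      · rintro ⟨t, r, hl, ht, hxs, hys⟩
        refine ⟨c :: t, r, by simp [hl], by simp, ?_, ?_⟩
        · rw [sdx_cons]; linarith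
        · rw [sdy_cons]; linarith
      · rintro ⟨t, r, hl, ht, hxs, hys⟩
        cases t with
        | nil => exact absurd rfl ht
        | cons c' t' =>
          rw [List.cons_append] at hl
          obtain ⟨hc, hcs⟩ := List.cons_eq_cons.mp hl
          subst hc
          simp only [sdx_cons] at hxs
          simp only [sdy_cons] at hys
          cases t' with
          | nil =>
            exfalso
            apply h
            constructor
            · simp only [sdx] at hxs; simp at hxs; linarith
            · simp only [sdy] at hys; simp at hys; linarith
          | cons c'' t'' =>
            refine ⟨c'' :: t'', r, hcs, by simp, ?_, ?_⟩
            · simp only [sdx_cons] at hxs ⊢; linarith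
            · simp only [sdy_cons] at hys ⊢; linarith

-- equivalence of the two characterisations on a nonempty string c :: cs
theorem core_iff (c : Char) (cs : List Char) :
    (∃ t r, c :: cs = t ++ r ∧ t ≠ [] ∧ (0 : Int) + sdx t = 0 ∧ (0 : Int) + sdy t = 0) ↔
      ((0 : Int) = sdx (c :: cs) ∧ (0 : Int) = sdy (c :: cs)) ∨
        (∃ t r, cs.reverse = t ++ r ∧ t ≠ [] ∧
          (0 : Int) + sdx t = sdx (c :: cs) ∧ (0 : Int) + sdy t = sdy (c :: cs)) := by
  constructor
  · rintro ⟨t, r, hl, ht, hxs, hys⟩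
    cases t with
    | nil => exact absurd rfl ht
    | cons c' t' =>
      rw [List.cons_append] at hl
      obtain ⟨hc, hcs⟩ := List.cons_eq_cons.mp hl
      subst hc
      subst hcs
      cases r with
      | nil =>
        left
        constructor
        · simp only [List.append_nil]; linarith
        · simp only [List.append_nil]; linarith
      | cons d r' =>
        right
        refine ⟨(d :: r').reverse, t'.reverse, by rw [List.reverse_append], by simp, ?_, ?_⟩
        · simp only [sdx_reverse, sdx_cons, sdx_append] at hxs ⊢; linarith
        · simp only [sdy_reverse, sdy_cons, sdy_append] at hys ⊢; linarith
  · rintro (⟨hx, hy⟩ | ⟨t, r, hl, ht, hxs, hys⟩)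
    · exact ⟨c :: cs, [], by simp, by simp, by linarith, by linarith⟩
    · have hcs : cs = r.reverse ++ t.reverse := by
        have := congrArg List.reverse hl
        simpa [List.reverse_append] using this
      subst hcs
      refine ⟨c :: r.reverse, t.reverse, by simp, by simp, ?_, ?_⟩
      · simp only [sdx_reverse, sdx_cons, sdx_append] at hxs ⊢; linarith
      · simp only [sdy_reverse, sdy_cons, sdy_append] at hys ⊢; linarith

-- ===== VERDICT (by name: the statement is the Claim_ definition above) =====
theorem mp_spec : Claim_equal_mp := by
  intro s _
  unfold Spec_mp mp mp_alt
  cases h : s.toList with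
  | nil => simp [mpLoop]
  | cons c cs =>
    simp only [List.cons_ne_nil, if_false, List.drop_one, List.tail_cons]
    rw [mpLoop_eq_altLoop]
    have hA := altLoop_iff (c :: cs) 0 0 0 0
    have hB := altLoop_iff cs.reverse 0 0 ((c :: cs).map mpAltDx).sum ((c :: cs).map mpAltDy).sum
    have hsx : ((c :: cs).map mpAltDx).sum = sdx (c :: cs) := rfl
    have hsy : ((c :: cs).map mpAltDy).sum = sdy (c :: cs) := rfl
    rw [hsx, hsy] at hB ⊢
    have hcore := core_iff c cs
    split_ifs with h0
    · -- RHS is true; show LHS is true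
      rw [hA]
      exact hcore.mpr (Or.inl h0)
    · -- neither the initial check fires; compare the two loops
      cases hL : mpAltLoop (c :: cs) 0 0 0 0 with
      | true =>
        rcases hcore.mp (hA.mp hL) with hc | hc
        · exact absurd hc h0
        · exact (hB.mpr hc).symm
      | false =>
        cases hR : mpAltLoop cs.reverse 0 0 (sdx (c :: cs)) (sdy (c :: cs)) with
        | true =>
          exfalso
          have : mpAltLoop (c :: cs) 0 0 0 0 = true :=
            hA.mpr (hcore.mpr (Or.inr (hB.mp hR)))
          rw [hL] at this; exact Bool.false_ne_true this
        | false => rfl
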